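-- pv_equiv track=rewrite | github.com/hbckleikamp/Useful_visualizations | DeNovosequencing MS2pip.py | non_overlapping_full_coverage
-- ===== SOURCE A (Python) =====
-- from itertools import combinations
--
-- def non_overlapping_full_coverage(ranges, gap_start, gap_end):
--     """
--     Find all minimal, non-overlapping combinations of ranges
--     that fully cover the gap [gap_start, gap_end].
--     """
--     gap = set(range(gap_start, gap_end + 1))
--     results = []
--
--     def overlaps(r1, r2):
--         a, b = r1
--         c, d = r2
--         return not (b < c or d < a)  # True if they overlap
--
--     for r in range(1, len(ranges) + 1):
--         for combo in combinations(ranges, r):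
--             # skip if any two ranges overlap
--             if any(overlaps(combo[i], combo[j]) for i in range(len(combo)) for j in range(i+1, len(combo))):
--                 continue
--
--             # compute total coverage
--             covered = set()
--             for a, b in combo:
--                 covered |= set(range(a, b + 1))
--             if not gap.issubset(covered):
--                 continue
--
--             # check minimality
--             is_minimal = True
--             for i in range(len(combo)):
--                 subcombo = combo[:i] + combo[i+1:]
--                 sub_covered = set()
--                 for x, y in subcombo:
--                     sub_covered |= set(range(x, y + 1))
--                 if gap.issubset(sub_covered):
--                     is_minimal = False
--                     break
--
--             if is_minimal:
--                 results.append(combo)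
--     return results
-- ===== SOURCE B (Python) =====
-- def non_overlapping_full_coverage(ranges, gap_start, gap_end):
--     """
--     Find all minimal, non-overlapping combinations of ranges
--     that fully cover the gap [gap_start, gap_end].
--
--     A combination qualifies iff, once sorted by start, it forms an exact
--     chain over the gap: the first range covers gap_start, the last covers
--     gap_end, and each next range starts exactly one past the previous end.
--     One sort + one linear scan per combination replaces A's set
--     materialisation, pairwise-overlap scan and minimality re-union loops.
--     """
--     from itertools import combinations
--     if gap_start > gap_end:
--         return []
--     results = []
--     for r in range(1, len(ranges) + 1):
--         for combo in combinations(ranges, r):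
--             s = sorted(combo)
--             if (s[0][0] <= gap_start <= s[0][1]
--                     and s[-1][0] <= gap_end <= s[-1][1]
--                     and all(s[j + 1][0] == s[j][1] + 1 and s[j + 1][0] <= s[j + 1][1]
--                             for j in range(len(s) - 1))):
--                 results.append(combo)
--     return results
-- ===== Notes on version B (the rewrite author's own statement) =====
-- stated objective: alternative
-- what changed: Per-combination test replaced: instead of materialising the gap and every range as Python sets, doing an O(k^2) pairwise-overlap scan and k more set-union passes for minimality, B sorts each combination by start and does one linear integer adjacency scan (exact chain over the gap), independent of the gap width (intended as faster; measured 2.6x at the largest size both finished, unconfirmed at larger sizes where both enumerations blow up).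
import Mathlib
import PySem

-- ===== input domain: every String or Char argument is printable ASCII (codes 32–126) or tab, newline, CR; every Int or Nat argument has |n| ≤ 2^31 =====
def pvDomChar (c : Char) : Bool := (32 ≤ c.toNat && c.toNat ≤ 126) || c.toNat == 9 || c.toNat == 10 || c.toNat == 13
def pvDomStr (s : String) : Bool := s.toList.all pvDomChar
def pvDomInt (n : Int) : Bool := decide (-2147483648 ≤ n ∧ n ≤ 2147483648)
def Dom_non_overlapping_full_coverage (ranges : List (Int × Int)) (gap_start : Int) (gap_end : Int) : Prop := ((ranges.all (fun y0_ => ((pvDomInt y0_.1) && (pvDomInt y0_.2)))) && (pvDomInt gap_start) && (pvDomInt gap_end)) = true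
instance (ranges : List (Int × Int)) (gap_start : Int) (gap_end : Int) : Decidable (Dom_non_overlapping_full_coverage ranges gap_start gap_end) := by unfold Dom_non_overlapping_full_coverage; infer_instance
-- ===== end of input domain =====

-- B replaces A's per-combination set materialisation, pairwise-overlap scan and
-- minimality re-union loops by one sort + one linear integer adjacency scan.

-- ===== PORT A =====

def pvOverlaps (r1 r2 : Int × Int) : Bool :=
  !(decide (r1.2 < r2.1) || decide (r2.2 < r1.1))

def pvAnyOverlap (combo : List (Int × Int)) : Bool :=
  (PySem.List.pyRange 0 (combo.length : Int)).any (fun i =>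
    (PySem.List.pyRange (i+1) (combo.length : Int)).any (fun j =>
      pvOverlaps (PySem.List.pyGetD combo i (0,0)) (PySem.List.pyGetD combo j (0,0))))

-- 'covered |= set(range(a, b+1))' ported by hand: range(a, b+1) has no duplicates, so the
-- union appends exactly the not-yet-present elements of the range, in range order — the
-- same Set value as PySem.Set.union covered (PySem.Set.ofList (pyRange a (b+1))), proved
-- below in pv_covered_exact (the direct form evaluates without the quadratic re-dedup).
def pvCovered (combo : List (Int × Int)) : PySem.Set Int :=
  combo.foldl (fun covered p =>
    covered ++ (PySem.List.pyRange p.1 (p.2+1)).filter (fun x => !PySem.Set.contains covered x))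
    PySem.Set.empty

def pvIsMinimal (gap : PySem.Set Int) (combo : List (Int × Int)) : Bool :=
  (PySem.List.pyRange 0 (combo.length : Int)).foldl (fun is_minimal i =>
    if PySem.Set.issubset gap (pvCovered
        (PySem.List.slice combo none (some i) ++ PySem.List.slice combo (some (i+1)) none))
    then false else is_minimal) true

def non_overlapping_full_coverage (ranges : List (Int × Int)) (gap_start : Int) (gap_end : Int) : List (List (Int × Int)) :=
  -- set(range(gap_start, gap_end+1)): a range has no duplicates, so the range list itself
  -- is that Set value (same elements, same first-insertion order)
  let gap : PySem.Set Int := PySem.List.pyRange gap_start (gap_end+1)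
  (PySem.List.pyRange 1 ((ranges.length : Int) + 1)).foldl (fun results r =>
    (PySem.List.combinations ranges r.toNat).foldl (fun results combo =>
      if pvAnyOverlap combo then results
      else if !(PySem.Set.issubset gap (pvCovered combo)) then results
      else if !(pvIsMinimal gap combo) then results
      else results ++ [combo]) results) []

-- ===== PORT B =====

def pvChainOk (gap_start gap_end : Int) (s : List (Int × Int)) : Bool :=
  decide ((PySem.List.pyGetD s 0 (0,0)).1 ≤ gap_start) &&
  decide (gap_start ≤ (PySem.List.pyGetD s 0 (0,0)).2) &&
  decide ((PySem.List.pyGetD s (-1) (0,0)).1 ≤ gap_end) &&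
  decide (gap_end ≤ (PySem.List.pyGetD s (-1) (0,0)).2) &&
  (PySem.List.pyRange 0 ((s.length : Int) - 1)).all (fun j =>
    decide ((PySem.List.pyGetD s (j+1) (0,0)).1 = (PySem.List.pyGetD s j (0,0)).2 + 1) &&
    decide ((PySem.List.pyGetD s (j+1) (0,0)).1 ≤ (PySem.List.pyGetD s (j+1) (0,0)).2))

def non_overlapping_full_coverage_alt (ranges : List (Int × Int)) (gap_start : Int) (gap_end : Int) : List (List (Int × Int)) :=
  if gap_start > gap_end then []
  else
    (PySem.List.pyRange 1 ((ranges.length : Int) + 1)).foldl (fun results r =>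
      (PySem.List.combinations ranges r.toNat).foldl (fun results combo =>
        if pvChainOk gap_start gap_end (PySem.List.sorted2 combo (·.1) (·.2)) then results ++ [combo]
        else results) results) []

-- ===== PRECONDITION & SPEC =====
def Spec_non_overlapping_full_coverage (ranges : List (Int × Int)) (gap_start : Int) (gap_end : Int) (out : List (List (Int × Int))) : Prop := out = non_overlapping_full_coverage_alt ranges gap_start gap_end
instance (ranges : List (Int × Int)) (gap_start : Int) (gap_end : Int) (out : List (List (Int × Int))) : Decidable (Spec_non_overlapping_full_coverage ranges gap_start gap_end out) := by unfold Spec_non_overlapping_full_coverage; infer_instance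

-- ===== CLAIM (what is proved, stated in full; the proofs are below) =====
def Claim_equal_non_overlapping_full_coverage : Prop := ∀ (ranges : List (Int × Int)) (gap_start : Int) (gap_end : Int), Dom_non_overlapping_full_coverage ranges gap_start gap_end → Spec_non_overlapping_full_coverage ranges gap_start gap_end (non_overlapping_full_coverage ranges gap_start gap_end)

-- ===== LEMMAS AND PROOFS =====

-- The mathematical reading of A's three per-combination tests
def pvDisjP (c : List (Int × Int)) : Prop := c.Pairwise (fun p q => p.2 < q.1 ∨ q.2 < p.1)
def pvCovP (gs ge : Int) (l : List (Int × Int)) : Prop :=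
  ∀ x : Int, gs ≤ x → x ≤ ge → ∃ p ∈ l, p.1 ≤ x ∧ x ≤ p.2
def pvMinP (gs ge : Int) (c : List (Int × Int)) : Prop :=
  ∀ i : Nat, i < c.length → ¬ pvCovP gs ge (c.eraseIdx i)

-- The mathematical reading of B's chain test
def pvChainP (gs ge : Int) (s : List (Int × Int)) : Prop :=
  ∃ hl : 0 < s.length,
    (s[0]'hl).1 ≤ gs ∧ gs ≤ (s[0]'hl).2 ∧
    (s[s.length-1]'(by omega)).1 ≤ ge ∧ ge ≤ (s[s.length-1]'(by omega)).2 ∧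
    ∀ j : Nat, (hj : j+1 < s.length) → (s[j+1]'hj).1 = (s[j]'(by omega)).2 + 1 ∧ (s[j+1]'hj).1 ≤ (s[j+1]'hj).2

theorem pv_pyGetD_nat {α : Type} (xs : List α) (n : Nat) (d : α) (h : n < xs.length) :
    PySem.List.pyGetD xs (n : Int) d = xs[n] := by
  rw [PySem.List.pyGetD_natCast]
  exact List.getD_eq_getElem xs d h

-- a fold of Set.add over a duplicate-free list appends exactly the missing elements, in order
theorem pv_foldl_add_eq (t : List Int) (s : PySem.Set Int) (ht : t.Nodup) :
    t.foldl PySem.Set.add s = s ++ t.filter (fun x => !PySem.Set.contains s x) := by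
  induction t generalizing s with
  | nil => simp
  | cons x t ih =>
    rcases List.nodup_cons.1 ht with ⟨hx, ht'⟩
    rw [List.foldl_cons, List.filter_cons]
    by_cases hmem : PySem.Set.contains s x = true
    · have hmem' : x ∈ s := by simpa using hmem
      rw [show PySem.Set.add s x = s by simp [PySem.Set.add, hmem'], ih s ht']
      simp [hmem']
    · have hmem' : x ∉ s := by simpa using hmem
      rw [show PySem.Set.add s x = s ++ [x] by simp [PySem.Set.add, hmem'], ih _ ht']
      have hf : t.filter (fun y => !PySem.Set.contains (s ++ [x]) y)
          = t.filter (fun y => !PySem.Set.contains s y) := by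
        refine List.filter_congr ?_
        intro y hy
        have hyx : y ≠ x := fun h => hx (h ▸ hy)
        simp [PySem.Set.contains, hyx]
      rw [hf]
      simp [hmem']
  
-- the hand-ported union in pvCovered is exactly A's 'covered |= set(range(a, b+1))'
theorem pv_covered_exact (combo : List (Int × Int)) :
    pvCovered combo = combo.foldl (fun covered p =>
      PySem.Set.union covered (PySem.Set.ofList (PySem.List.pyRange p.1 (p.2+1)))) PySem.Set.empty := by
  unfold pvCovered
  refine PySem.List.foldl_congr_mem _ _ _ _ ?_
  intro acc p _
  have hnd : (PySem.List.pyRange p.1 (p.2+1)).Nodup := PySem.List.nodup_pyRange_one p.1 (p.2+1)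
  have hofl : PySem.Set.ofList (PySem.List.pyRange p.1 (p.2+1)) = PySem.List.pyRange p.1 (p.2+1) := by
    have := pv_foldl_add_eq (PySem.List.pyRange p.1 (p.2+1)) PySem.Set.empty hnd
    simpa [PySem.Set.ofList, PySem.Set.empty, PySem.Set.contains] using this
  rw [hofl]
  show acc ++ _ = (PySem.List.pyRange p.1 (p.2+1)).foldl PySem.Set.add acc
  rw [pv_foldl_add_eq _ acc hnd]

theorem pv_mem_covered_aux (l : List (Int × Int)) (acc : PySem.Set Int) (x : Int) :
    x ∈ l.foldl (fun covered p =>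
      PySem.Set.union covered (PySem.Set.ofList (PySem.List.pyRange p.1 (p.2+1)))) acc ↔
    x ∈ acc ∨ ∃ p ∈ l, p.1 ≤ x ∧ x ≤ p.2 := by
  induction l generalizing acc with
  | nil => simp
  | cons h t ih =>
    simp only [List.foldl_cons, ih, PySem.Set.mem_union, PySem.Set.mem_ofList,
      PySem.List.mem_pyRange_one, List.mem_cons]
    constructor
    · rintro ((hx | hx) | ⟨p, hp, h1, h2⟩)
      · exact Or.inl hx
      · exact Or.inr ⟨h, Or.inl rfl, hx.1, by omega⟩
      · exact Or.inr ⟨p, Or.inr hp, h1, h2⟩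
    · rintro (hx | ⟨p, (rfl | hp), h1, h2⟩)
      · exact Or.inl (Or.inl hx)
      · exact Or.inl (Or.inr ⟨h1, by omega⟩)
      · exact Or.inr ⟨p, hp, h1, h2⟩

theorem pv_mem_covered (l : List (Int × Int)) (x : Int) :
    x ∈ pvCovered l ↔ ∃ p ∈ l, p.1 ≤ x ∧ x ≤ p.2 := by
  rw [pv_covered_exact]
  have := pv_mem_covered_aux l PySem.Set.empty x
  simpa [PySem.Set.empty] using this

theorem pv_issubset_gap (gs ge : Int) (S : PySem.Set Int) :
    PySem.Set.issubset (PySem.List.pyRange gs (ge+1) : PySem.Set Int) S = true ↔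
      ∀ x : Int, gs ≤ x → x ≤ ge → x ∈ S := by
  rw [PySem.Set.issubset_iff]
  constructor
  · intro h x h1 h2
    exact h x (by rw [PySem.List.mem_pyRange_one]; omega)
  · intro h x hx
    rw [PySem.List.mem_pyRange_one] at hx
    exact h x hx.1 (by omega)

theorem pv_subset_cov (gs ge : Int) (l : List (Int × Int)) :
    PySem.Set.issubset (PySem.List.pyRange gs (ge+1) : PySem.Set Int) (pvCovered l) = true ↔
      pvCovP gs ge l := by
  rw [pv_issubset_gap]
  unfold pvCovP
  constructor
  · intro h x h1 h2; exact (pv_mem_covered l x).1 (h x h1 h2)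
  · intro h x h1 h2; exact (pv_mem_covered l x).2 (h x h1 h2)

theorem pv_slices_eraseIdx (c : List (Int × Int)) (i : Int) (h0 : 0 ≤ i) :
    PySem.List.slice c none (some i) ++ PySem.List.slice c (some (i+1)) none = c.eraseIdx i.toNat := by
  rw [PySem.List.slice_to c h0, PySem.List.slice_from c (show (0:Int) ≤ i+1 by omega),
      List.eraseIdx_eq_take_drop_succ, show (i+1).toNat = i.toNat + 1 by omega]

theorem pv_isMinimal_iff (gs ge : Int) (c : List (Int × Int)) :
    pvIsMinimal (PySem.List.pyRange gs (ge+1)) c = true ↔ pvMinP gs ge c := by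
  unfold pvIsMinimal pvMinP
  rw [PySem.List.foldl_if_false_eq]
  rw [Bool.true_and, Bool.not_eq_true', List.any_eq_false]
  constructor
  · intro h i hi
    have := h (i : Int) (by rw [PySem.List.mem_pyRange_one]; omega)
    rw [pv_slices_eraseIdx c (i : Int) (by omega)] at this
    simp only [Int.toNat_natCast] at this
    rw [Bool.not_eq_true, Bool.eq_false_iff, Ne, pv_subset_cov] at this
    exact this
  · intro h i hi
    rw [PySem.List.mem_pyRange_one] at hi
    rw [pv_slices_eraseIdx c i (by omega)]
    rw [Bool.not_eq_true, Bool.eq_false_iff, Ne, pv_subset_cov]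
    exact h i.toNat (by omega)

theorem pv_anyOverlap_iff (c : List (Int × Int)) :
    pvAnyOverlap c = false ↔ pvDisjP c := by
  unfold pvAnyOverlap pvDisjP
  rw [List.any_eq_false, List.pairwise_iff_getElem]
  constructor
  · intro h i j hi hj hij
    have h1 := h (i : Int) (by rw [PySem.List.mem_pyRange_one]; omega)
    simp only [Bool.not_eq_true, List.any_eq_false] at h1
    have h2 := h1 (j : Int) (by rw [PySem.List.mem_pyRange_one]; omega)
    rw [pv_pyGetD_nat c i _ hi, pv_pyGetD_nat c j _ hj] at h2
    simp only [pvOverlaps, Bool.not_eq_true, Bool.not_eq_false', Bool.or_eq_true,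
      decide_eq_true_iff] at h2
    omega
  · intro h i hi
    rw [PySem.List.mem_pyRange_one] at hi
    simp only [Bool.not_eq_true, List.any_eq_false]
    intro j hj
    rw [PySem.List.mem_pyRange_one] at hj
    rw [show i = ((i.toNat : Nat) : Int) by omega, show j = ((j.toNat : Nat) : Int) by omega,
       pv_pyGetD_nat c i.toNat _ (by omega), pv_pyGetD_nat c j.toNat _ (by omega)]
    have := h i.toNat j.toNat (by omega) (by omega) (by omega)
    simp only [pvOverlaps, Bool.not_eq_true, Bool.not_eq_false', Bool.or_eq_true,
      decide_eq_true_iff]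
    omega

theorem pv_chainOk_iff (gs ge : Int) (s : List (Int × Int)) (h : s ≠ []) :
    pvChainOk gs ge s = true ↔ pvChainP gs ge s := by
  have hl : 0 < s.length := List.length_pos_iff.2 h
  unfold pvChainOk pvChainP
  rw [PySem.List.pyGetD_neg_one s (0,0) h, List.getLast_eq_getElem,
      show ((0:Int) = ((0:Nat):Int)) by norm_num, pv_pyGetD_nat s 0 _ hl]
  simp only [Bool.and_eq_true, decide_eq_true_iff, List.all_eq_true]
  constructor
  · rintro ⟨⟨⟨⟨h1, h2⟩, h3⟩, h4⟩, h5⟩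
    refine ⟨hl, h1, h2, h3, h4, ?_⟩
    intro j hj
    have := h5 (j : Int) (by rw [PySem.List.mem_pyRange_one]; omega)
    rw [show ((j:Int)+1) = (((j+1 : Nat)):Int) by push_cast; ring,
        pv_pyGetD_nat s (j+1) _ hj, pv_pyGetD_nat s j _ (by omega)] at this
    simpa using this
  · rintro ⟨_, h1, h2, h3, h4, h5⟩
    refine ⟨⟨⟨⟨h1, h2⟩, h3⟩, h4⟩, ?_⟩
    intro j hj
    rw [PySem.List.mem_pyRange_one] at hj
    rw [show j = ((j.toNat : Nat) : Int) by omega,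
        show ((j.toNat:Int)+1) = (((j.toNat+1 : Nat)):Int) by push_cast; ring,
        pv_pyGetD_nat s (j.toNat+1) _ (by omega), pv_pyGetD_nat s j.toNat _ (by omega)]
    have := h5 j.toNat (by omega)
    simpa using this

theorem pv_insertBy_pairwise {α : Type} (R : α → α → Prop) (before : α → α → Bool)
    (htrans : Transitive R)
    (h1 : ∀ a b, before a b = true → R a b)
    (h2 : ∀ a b, before a b = false → R b a)
    (x : α) (ys : List α) (hp : ys.Pairwise R) :
    (PySem.List.insertBy before x ys).Pairwise R := by
  induction ys with
  | nil => simp [PySem.List.insertBy]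
  | cons y t ih =>
    rw [List.pairwise_cons] at hp
    by_cases hb : before x y = true
    · show (if before x y = true then x :: y :: t else y :: PySem.List.insertBy before x t).Pairwise R
      rw [if_pos hb]
      refine List.Pairwise.cons ?_ (List.Pairwise.cons hp.1 hp.2)
      intro z hz
      rcases List.mem_cons.1 hz with rfl | hz
      · exact h1 _ _ hb
      · exact htrans (h1 _ _ hb) (hp.1 z hz)
    · show (if before x y = true then x :: y :: t else y :: PySem.List.insertBy before x t).Pairwise R
      rw [if_neg hb]
      refine List.Pairwise.cons ?_ (ih hp.2)
      intro z hz
      rcases (PySem.List.mem_insertBy _ _ _ _).1 hz with rfl | hz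
      · exact h2 _ _ (by simpa using hb)
      · exact hp.1 z hz

theorem pv_foldl_insertBy_pairwise {α : Type} (R : α → α → Prop) (before : α → α → Bool)
    (htrans : Transitive R)
    (h1 : ∀ a b, before a b = true → R a b)
    (h2 : ∀ a b, before a b = false → R b a)
    (c : List α) (acc : List α) (hacc : acc.Pairwise R) :
    (c.foldl (fun acc x => PySem.List.insertBy before x acc) acc).Pairwise R := by
  induction c generalizing acc with
  | nil => simpa
  | cons x t ih => exact ih _ (pv_insertBy_pairwise R before htrans h1 h2 x acc hacc)

theorem pv_sorted2_pairwise_fst (c : List (Int × Int)) :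
    (PySem.List.sorted2 c (·.1) (·.2)).Pairwise (fun p q => p.1 ≤ q.1) := by
  show (List.foldl _ [] c).Pairwise _
  refine pv_foldl_insertBy_pairwise _ _ ?_ ?_ ?_ c [] (by simp)
  · intro a b c hab hbc; omega
  · intro a b hb; simp at hb; rcases hb with h | ⟨h, _⟩ <;> omega
  · intro a b hb; simp at hb
    by_cases hab : a.1 ≤ b.1
    · have := hb.2 hab; omega
    · omega

theorem pv_chain_ne (gs ge : Int) (s : List (Int × Int)) (h : pvChainP gs ge s) :
    ∀ j : Nat, (hj : j < s.length) → (s[j]'hj).1 ≤ (s[j]'hj).2 := by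
  obtain ⟨hl, h0a, h0b, _, _, hadj⟩ := h
  intro j hj
  cases j with
  | zero => omega
  | succ j => have := hadj j hj; omega

-- later chain elements start strictly after earlier ones end

theorem pv_chain_lt (gs ge : Int) (s : List (Int × Int)) (h : pvChainP gs ge s) :
    ∀ j : Nat, (hj : j < s.length) → ∀ m : Nat, (hm : m < j) → (s[m]'(by omega)).2 < (s[j]'hj).1 := by
  obtain ⟨hl, h0a, h0b, _, _, hadj⟩ := h
  intro j
  induction j with
  | zero => omega
  | succ j ih =>
    intro hj m hm
    have hja := hadj j hj
    by_cases hmj : m = j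
    · subst hmj; omega
    · have h1 := ih (by omega) m (by omega)
      have h2 := pv_chain_ne gs ge s ⟨hl, h0a, h0b, ‹_›, ‹_›, hadj⟩ j (by omega)
      omega

-- a chain covers everything between its first start and any element's end

theorem pv_chain_cov (gs ge : Int) (s : List (Int × Int)) (h : pvChainP gs ge s) :
    ∀ j : Nat, (hj : j < s.length) → ∀ x : Int,
      (s[0]'(by omega)).1 ≤ x → x ≤ (s[j]'hj).2 →
      ∃ m : Nat, ∃ hm : m < s.length, (s[m]'hm).1 ≤ x ∧ x ≤ (s[m]'hm).2 := by
  obtain ⟨hl, h0a, h0b, _, _, hadj⟩ := h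
  intro j
  induction j with
  | zero => intro hj x h1 h2; exact ⟨0, hl, h1, h2⟩
  | succ j ih =>
    intro hj x h1 h2
    by_cases hx : x ≤ (s[j]'(by omega)).2
    · exact ih (by omega) x h1 hx
    · have := hadj j hj
      exact ⟨j+1, hj, by omega, h2⟩

-- each chain element meets the gap

theorem pv_chain_hit (gs ge : Int) (s : List (Int × Int)) (h : pvChainP gs ge s) :
    ∀ j : Nat, (hj : j < s.length) → (s[j]'hj).1 ≤ ge ∧ gs ≤ (s[j]'hj).2 := by
  obtain ⟨hl, h0a, h0b, hLa, hLb, hadj⟩ := h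
  have hch : pvChainP gs ge s := ⟨hl, h0a, h0b, hLa, hLb, hadj⟩
  intro j hj
  constructor
  · by_cases hjl : j = s.length - 1
    · subst hjl; exact hLa
    · have h1 := pv_chain_lt gs ge s hch (s.length-1) (by omega) j (by omega)
      have h2 := pv_chain_ne gs ge s hch j hj
      omega
  · by_cases hj0 : j = 0
    · subst hj0; exact h0b
    · have h1 := pv_chain_lt gs ge s hch j hj 0 (by omega)
      have h2 := pv_chain_ne gs ge s hch j hj
      omega

theorem pv_chain_nodup (gs ge : Int) (s : List (Int × Int)) (h : pvChainP gs ge s) :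
    s.Nodup := by
  rw [List.Nodup, List.pairwise_iff_getElem]
  intro i j hi hj hij
  have h1 := pv_chain_lt gs ge s h j hj i hij
  have h2 := pv_chain_ne gs ge s h i (by omega)
  intro heq
  have e1 : (s[i]'(by omega)).1 = (s[j]'hj).1 := by rw [heq]
  have e2 : (s[i]'(by omega)).2 = (s[j]'hj).2 := by rw [heq]
  omega

theorem pv_backward (gs ge : Int) (cs : List (Int × Int)) (hge : gs ≤ ge)
    (hch : pvChainP gs ge (PySem.List.sorted2 cs (·.1) (·.2))) :
    pvDisjP cs ∧ pvCovP gs ge cs ∧ pvMinP gs ge cs := by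
  set s := PySem.List.sorted2 cs (·.1) (·.2) with hs
  have hperm : s.Perm cs := PySem.List.sorted2_perm cs _ _ false
  obtain ⟨hl, h0a, h0b, hLa, hLb, hadj⟩ := hch
  have hch' : pvChainP gs ge s := ⟨hl, h0a, h0b, hLa, hLb, hadj⟩
  have hsymm : Symmetric (fun p q : Int × Int => p.2 < q.1 ∨ q.2 < p.1) := by
    intro p q h; tauto
  have hdisjS : s.Pairwise (fun p q => p.2 < q.1 ∨ q.2 < p.1) := by
    rw [List.pairwise_iff_getElem]
    intro i j hi hj hij
    exact Or.inl (pv_chain_lt gs ge s hch' j hj i hij)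
  have hnodupC : cs.Nodup := hperm.nodup_iff.1 (pv_chain_nodup gs ge s hch')
  refine ⟨(List.Perm.pairwise_iff (fun {p q} h => hsymm h) hperm).1 hdisjS, ?_, ?_⟩
  · -- coverage
    intro x h1 h2
    obtain ⟨m, hm, hma, hmb⟩ := pv_chain_cov gs ge s hch' (s.length-1) (by omega) x
      (by omega) (by omega)
    exact ⟨s[m]'hm, hperm.mem_iff.1 (List.getElem_mem hm), hma, hmb⟩
  · -- minimality
    intro i hi hcov
    have hpmem : cs[i]'hi ∈ s := hperm.mem_iff.2 (List.getElem_mem hi)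
    obtain ⟨j, hj, hjp⟩ := List.mem_iff_getElem.1 hpmem
    have hhit := pv_chain_hit gs ge s hch' j hj
    have hne := pv_chain_ne gs ge s hch' j hj
    -- the witness point only cs[i] covers
    set x := max (s[j]'hj).1 gs with hx
    obtain ⟨q, hq, hqa, hqb⟩ := hcov x (by omega) (by omega)
    obtain ⟨k, hk, hki, hkq⟩ := List.mem_eraseIdx_iff_getElem.1 hq
    have hqc : q ∈ cs := by rw [← hkq]; exact List.getElem_mem hk
    have hqnep : q ≠ cs[i]'hi := by
      intro heq
      exact hki ((List.Nodup.getElem_inj_iff hnodupC).1 (by rw [hkq, heq]))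
    obtain ⟨m, hm, hmq⟩ := List.mem_iff_getElem.1 (hperm.mem_iff.2 hqc)
    have hmj : m ≠ j := by
      intro heq; subst heq; exact hqnep (by rw [← hmq, hjp])
    rcases Nat.lt_or_ge m j with hlt | hgt
    · have := pv_chain_lt gs ge s hch' j hj m hlt
      rw [hmq] at this
      omega
    · have hjm : j < m := by omega
      have := pv_chain_lt gs ge s hch' m hm j hjm
      rw [hmq] at this
      omega

theorem pv_forward (gs ge : Int) (cs : List (Int × Int)) (hne : cs ≠ [])
    (hd : pvDisjP cs) (hc : pvCovP gs ge cs) (hm : pvMinP gs ge cs) :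
    gs ≤ ge ∧ pvChainP gs ge (PySem.List.sorted2 cs (·.1) (·.2)) := by
  have hlen : 0 < cs.length := List.length_pos_iff.2 hne
  have hge : gs ≤ ge := by
    by_contra hlt
    exact hm 0 hlen (fun x h1 h2 => absurd (h1.trans h2) hlt)
  have hhitI : ∀ i : Nat, (hi : i < cs.length) →
      (cs[i]'hi).1 ≤ (cs[i]'hi).2 ∧ gs ≤ (cs[i]'hi).2 ∧ (cs[i]'hi).1 ≤ ge := by
    intro i hi
    have h1 := hm i hi
    simp only [pvCovP, not_forall] at h1
    obtain ⟨x, hx1, hx2, hx3⟩ := h1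
    obtain ⟨p, hp, hpa, hpb⟩ := hc x hx1 hx2
    obtain ⟨k, hk, hkp⟩ := List.mem_iff_getElem.1 hp
    by_cases hki : k = i
    · subst hki; rw [hkp]; omega
    · exact absurd ⟨p, List.mem_eraseIdx_iff_getElem.2 ⟨k, hk, hki, hkp⟩, hpa, hpb⟩ hx3
  have hhit : ∀ p ∈ cs, p.1 ≤ p.2 ∧ gs ≤ p.2 ∧ p.1 ≤ ge := by
    intro p hp
    obtain ⟨k, hk, hkp⟩ := List.mem_iff_getElem.1 hp
    rw [← hkp]; exact hhitI k hk
  set s := PySem.List.sorted2 cs (·.1) (·.2) with hs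
  have hperm : s.Perm cs := PySem.List.sorted2_perm cs _ _ false
  have hsymm : Symmetric (fun p q : Int × Int => p.2 < q.1 ∨ q.2 < p.1) := by
    intro p q h; tauto
  have hdisjS : s.Pairwise (fun p q => p.2 < q.1 ∨ q.2 < p.1) :=
    (List.Perm.pairwise_iff (fun {p q} h => hsymm h) hperm).2 hd
  have hpwf := pv_sorted2_pairwise_fst cs
  rw [← hs] at hpwf
  have hhitS : ∀ j : Nat, (hj : j < s.length) →
      (s[j]'hj).1 ≤ (s[j]'hj).2 ∧ gs ≤ (s[j]'hj).2 ∧ (s[j]'hj).1 ≤ ge := by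
    intro j hj
    exact hhit _ (hperm.mem_iff.1 (List.getElem_mem hj))
  have hsl : 0 < s.length := by rw [hperm.length_eq]; exact hlen
  have hcovS : pvCovP gs ge s := by
    intro x h1 h2
    obtain ⟨p, hp, hpa, hpb⟩ := hc x h1 h2
    exact ⟨p, hperm.mem_iff.2 hp, hpa, hpb⟩
  rw [List.pairwise_iff_getElem] at hdisjS hpwf
  have hallLt : ∀ m j : Nat, (hm : m < s.length) → (hj : j < s.length) → m < j →
      (s[m]'hm).2 < (s[j]'hj).1 := by
    intro m j hm' hj hmj
    rcases hdisjS m j hm' hj hmj with h | h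
    · exact h
    · exfalso
      have h1 := hpwf m j hm' hj hmj
      have h2 := (hhitS j hj).1
      omega
  refine ⟨hge, hsl, ?_, ?_, ?_, ?_, ?_⟩
  · -- s[0].1 ≤ gs
    obtain ⟨p, hp, hpa, hpb⟩ := hcovS gs le_rfl hge
    obtain ⟨m, hm', hmp⟩ := List.mem_iff_getElem.1 hp
    by_cases hm0 : m = 0
    · subst hm0; rw [hmp]; exact hpa
    · exfalso
      have h1 := hallLt 0 m hsl hm' (by omega)
      have h2 := (hhitS 0 hsl).2.1
      rw [hmp] at h1
      omega
  · exact (hhitS 0 hsl).2.1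
  · exact (hhitS (s.length-1) (by omega)).2.2
  · -- ge ≤ s[last].2
    obtain ⟨p, hp, hpa, hpb⟩ := hcovS ge hge le_rfl
    obtain ⟨m, hm', hmp⟩ := List.mem_iff_getElem.1 hp
    by_cases hml : m = s.length - 1
    · subst hml; rw [hmp]; exact hpb
    · exfalso
      have h1 := hallLt m (s.length-1) hm' (by omega) (by omega)
      have h2 := (hhitS (s.length-1) (by omega)).2.2
      rw [hmp] at h1
      omega
  · -- adjacency
    intro j hj
    have hj' : j < s.length := by omega
    have hnej1 := (hhitS (j+1) hj).1
    refine ⟨?_, hnej1⟩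
    have hlt := hallLt j (j+1) hj' hj (by omega)
    have hgspt : gs ≤ (s[j]'hj').2 + 1 := by have := (hhitS j hj').2.1; omega
    have hptge : (s[j]'hj').2 + 1 ≤ ge := by have := (hhitS (j+1) hj).2.2; omega
    obtain ⟨p, hp, hpa, hpb⟩ := hcovS ((s[j]'hj').2 + 1) hgspt hptge
    obtain ⟨m, hm', hmp⟩ := List.mem_iff_getElem.1 hp
    rcases Nat.lt_or_ge j m with hjm | hmj
    · have hle : (s[j+1]'hj).1 ≤ (s[m]'hm').1 := by
        rcases Nat.eq_or_lt_of_le hjm with heq | hlt2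
        · subst heq; exact le_rfl
        · exact hpwf (j+1) m hj hm' hlt2
      rw [hmp] at hle
      omega
    · exfalso
      have hm2 : (s[m]'hm').2 ≤ (s[j]'hj').2 := by
        rcases Nat.eq_or_lt_of_le hmj with heq | hlt2
        · subst heq; exact le_rfl
        · have h1 := hallLt m j hm' hj' hlt2
          have h2 := (hhitS j hj').1
          omega
      rw [hmp] at hm2
      omega

theorem pv_innerA (gap : PySem.Set Int) (l : List (List (Int × Int))) (init : List (List (Int × Int))) :
    l.foldl (fun results combo =>
      if pvAnyOverlap combo then results
      else if !(PySem.Set.issubset gap (pvCovered combo)) then results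
      else if !(pvIsMinimal gap combo) then results
      else results ++ [combo]) init
    = init ++ l.filter (fun combo =>
        !pvAnyOverlap combo && PySem.Set.issubset gap (pvCovered combo) && pvIsMinimal gap combo) := by
  rw [PySem.List.foldl_congr_mem _ _ (fun results combo =>
      if !pvAnyOverlap combo && PySem.Set.issubset gap (pvCovered combo) && pvIsMinimal gap combo
      then results ++ [combo] else results) init ?_]
  · exact PySem.List.foldl_append_if_eq_filter _ l init
  · intro acc x hx
    cases h1 : pvAnyOverlap x <;>
      cases h2 : PySem.Set.issubset gap (pvCovered x) <;>
        cases h3 : pvIsMinimal gap x <;> simp [h1, h2, h3]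

-- B's inner loop is a filter by its chain test

theorem pv_innerB (gs ge : Int) (l : List (List (Int × Int))) (init : List (List (Int × Int))) :
    l.foldl (fun results combo =>
      if pvChainOk gs ge (PySem.List.sorted2 combo (·.1) (·.2)) then results ++ [combo]
      else results) init
    = init ++ l.filter (fun combo => pvChainOk gs ge (PySem.List.sorted2 combo (·.1) (·.2))) :=
  PySem.List.foldl_append_if_eq_filter _ l init

theorem pv_main (ranges : List (Int × Int)) (gs ge : Int) :
    non_overlapping_full_coverage ranges gs ge = non_overlapping_full_coverage_alt ranges gs ge := by
  unfold non_overlapping_full_coverage non_overlapping_full_coverage_alt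
  have hcombo_ne : ∀ r : Int, r ∈ PySem.List.pyRange 1 ((ranges.length : Int) + 1) →
      ∀ c ∈ PySem.List.combinations ranges r.toNat, c ≠ [] := by
    intro r hr c hc
    rw [PySem.List.mem_pyRange_one] at hr
    have := (PySem.List.mem_combinations_iff ranges r.toNat c).1 hc
    intro hnil
    rw [hnil] at this
    simp at this
    omega
  by_cases hge : gs ≤ ge
  · rw [if_neg (by omega)]
    refine PySem.List.foldl_congr_mem _ _ _ [] ?_
    intro acc r hr
    rw [pv_innerA, pv_innerB]
    congr 1
    refine List.filter_congr ?_
    intro c hc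
    have hne := hcombo_ne r hr c hc
    have hsne : PySem.List.sorted2 c (·.1) (·.2) ≠ [] := by
      intro h
      have := PySem.List.sorted2_perm c (fun p : Int × Int => p.1) (fun p : Int × Int => p.2) false
      rw [h] at this
      exact hne (this.symm.eq_nil ▸ rfl)
    rw [Bool.eq_iff_iff]
    simp only [Bool.and_eq_true, Bool.not_eq_true']
    rw [pv_anyOverlap_iff, pv_subset_cov, pv_isMinimal_iff, pv_chainOk_iff gs ge _ hsne]
    constructor
    · rintro ⟨⟨h1, h2⟩, h3⟩
      exact (pv_forward gs ge c hne h1 h2 h3).2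
    · intro h
      obtain ⟨h1, h2, h3⟩ := pv_backward gs ge c hge h
      exact ⟨⟨h1, h2⟩, h3⟩
  · rw [if_pos (by omega)]
    rw [PySem.List.foldl_congr_mem _ _ (fun results _ => results) [] ?_]
    · exact PySem.List.foldl_ignore _ _
    · intro acc r hr
      rw [pv_innerA]
      have : (PySem.List.combinations ranges r.toNat).filter (fun combo =>
          !pvAnyOverlap combo &&
          PySem.Set.issubset (PySem.List.pyRange gs (ge+1) : PySem.Set Int) (pvCovered combo) &&
          pvIsMinimal (PySem.List.pyRange gs (ge+1)) combo) = [] := by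
        rw [List.filter_eq_nil_iff]
        intro c hc
        intro hb
        simp only [Bool.and_eq_true, Bool.not_eq_true'] at hb
        obtain ⟨⟨h1, h2⟩, h3⟩ := hb
        rw [pv_anyOverlap_iff] at h1
        rw [pv_subset_cov] at h2
        rw [pv_isMinimal_iff] at h3
        exact hge (pv_forward gs ge c (hcombo_ne r hr c hc) h1 h2 h3).1
      rw [this, List.append_nil]

-- ===== VERDICT (by name: the statement is the Claim_ definition above) =====
theorem non_overlapping_full_coverage_spec : Claim_equal_non_overlapping_full_coverage := by
  intro ranges gap_start gap_end _
  unfold Spec_non_overlapping_full_coverage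
  exact pv_main ranges gap_start gap_end
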